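-- pv_equiv track=rewrite | github.com/rootid23/fft-py | bb-cmp/remove_str.py | remove_triplicate
-- ===== SOURCE A (Python) =====
-- def remove_triplicate(string):
--     res = ""
--     i = 0
--     while i < len(string):
--         if i < len(string) - 2 and string[i]*3 == string[i:i+3]:
--             i += 3
--         else:
--             res += string[i]
--             i += 1
--
--     if len(res) == len(string):
--         return res
--     else:
--         return remove_triplicate(res)
-- ===== SOURCE B (Python) =====
-- def remove_triplicate(string):
--     # Single left-to-right pass with a stack of [char, run_count] (count kept < 3);
--     # a run reaching 3 is dropped, automatically merging with the run below.
--     stack = []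
--     for c in string:
--         if stack and stack[-1][0] == c:
--             if stack[-1][1] == 2:
--                 stack.pop()
--             else:
--                 stack[-1][1] += 1
--         else:
--             stack.append([c, 1])
--     return "".join(c * k for c, k in stack)
-- ===== Notes on version B (the rewrite author's own statement) =====
-- stated objective: faster
-- what changed: Replaced the repeated whole-string scan-and-rebuild passes (recursing until a fixpoint) with one linear pass over a stack of (char, run-count) entries that cancels a run when it reaches three, merging neighbouring runs automatically.
import Mathlib
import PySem

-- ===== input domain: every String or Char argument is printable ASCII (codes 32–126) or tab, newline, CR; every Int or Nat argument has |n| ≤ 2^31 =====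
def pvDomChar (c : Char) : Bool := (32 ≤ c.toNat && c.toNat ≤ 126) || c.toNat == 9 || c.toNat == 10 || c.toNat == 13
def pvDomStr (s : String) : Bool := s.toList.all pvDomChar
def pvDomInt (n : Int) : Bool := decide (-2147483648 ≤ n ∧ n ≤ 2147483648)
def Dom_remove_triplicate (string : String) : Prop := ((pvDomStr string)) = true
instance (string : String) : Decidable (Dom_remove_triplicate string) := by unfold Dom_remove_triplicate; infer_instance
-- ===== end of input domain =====

-- B is one linear stack pass instead of A's repeated scan-and-rebuild passes; timed faster on large inputs.

-- ===== PORT A =====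
-- One while-loop pass: skip three equal consecutive chars, otherwise copy one char.
def passA : List Char → List Char
  | c1 :: c2 :: c3 :: rest =>
      if c1 = c2 ∧ c1 = c3 then passA rest
      else c1 :: passA (c2 :: c3 :: rest)
  | l => l

theorem passA_length (l : List Char) : (passA l).length ≤ l.length := by
  fun_induction passA with
  | case1 c1 c2 c3 rest h ih => simp only [List.length_cons]; omega
  | case2 c1 c2 c3 rest h ih =>
      simp only [List.length_cons] at ih ⊢; omega
  | case3 l h => exact le_refl _

-- A's tail recursion: recurse on the pass result until the length is unchanged.
def rtList (l : List Char) : List Char :=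
  let r := passA l
  if r.length = l.length then r else rtList r
termination_by l.length
decreasing_by
  have h := passA_length l
  simp only [r] at *
  omega

def remove_triplicate (string : String) : String := String.ofList (rtList string.toList)

-- ===== PORT B =====
-- Stack of (char, run count); a run reaching 3 is popped (here: head of the list is the stack top).
def stepB (st : List (Char × Nat)) (c : Char) : List (Char × Nat) :=
  match st with
  | (d, k) :: rest =>
      if d = c then (if k = 2 then rest else (d, k + 1) :: rest)
      else (c, 1) :: (d, k) :: rest
  | [] => [(c, 1)]

-- ''.join(c * k for c, k in stack)  (stack bottom-first = reversed Lean stack)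
def flattenStack (st : List (Char × Nat)) : List Char :=
  st.reverse.flatMap (fun p => List.replicate p.2 p.1)

def remove_triplicate_alt (string : String) : String :=
  String.ofList (flattenStack (string.toList.foldl stepB []))

-- ===== PRECONDITION & SPEC =====
def Spec_remove_triplicate (string : String) (out : String) : Prop := out = remove_triplicate_alt string
instance (string : String) (out : String) : Decidable (Spec_remove_triplicate string out) := by unfold Spec_remove_triplicate; infer_instance

-- ===== CLAIM (what is proved, stated in full; the proofs are below) =====
def Claim_equal_remove_triplicate : Prop := ∀ (string : String), Dom_remove_triplicate string → Spec_remove_triplicate string (remove_triplicate string)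

-- ===== LEMMAS AND PROOFS =====

-- triple-freeness: no three consecutive equal chars
def tf : List Char → Bool
  | a :: b :: c :: r => if a = b ∧ a = c then false else tf (b :: c :: r)
  | _ => true

-- execution invariant of the stack: counts in {1,2}, adjacent entries carry distinct chars
def adjOK : List (Char × Nat) → Bool
  | p :: q :: r => p.1 ≠ q.1 && adjOK (q :: r)
  | _ => true

def Good (st : List (Char × Nat)) : Prop :=
  (∀ p ∈ st, p.2 = 1 ∨ p.2 = 2) ∧ adjOK st = true

theorem Good_nil : Good ([] : List (Char × Nat)) := by
  constructor <;> simp [adjOK]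

theorem good_step (st : List (Char × Nat)) (c : Char) (h : Good st) : Good (stepB st c) := by
  obtain ⟨h1, h2⟩ := h
  rcases st with _ | ⟨⟨d, k⟩, rest⟩
  · constructor <;> simp [stepB, adjOK]
  · by_cases hd : d = c
    · by_cases hk : k = 2
      · simp only [stepB, if_pos hd, if_pos hk]
        refine ⟨fun p hp => h1 p (List.mem_cons_of_mem _ hp), ?_⟩
        rcases rest with _ | ⟨q, rest'⟩
        · simp [adjOK]
        · simp only [adjOK, Bool.and_eq_true] at h2
          exact h2.2
      · simp only [stepB, if_pos hd, if_neg hk]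
        have hk1 : k = 1 := by
          rcases h1 (d, k) (by simp) with h | h
          · exact h
          · exact absurd h hk
        subst hk1
        refine ⟨?_, ?_⟩
        · intro p hp
          rcases List.mem_cons.mp hp with h | h
          · subst h; right; rfl
          · exact h1 p (List.mem_cons_of_mem _ h)
        · rcases rest with _ | ⟨q, rest'⟩
          · simp [adjOK]
          · simpa [adjOK] using (by simpa [adjOK] using h2 : d ≠ q.1 ∧ adjOK (q :: rest') = true)
    · simp only [stepB, if_neg hd]
      refine ⟨?_, ?_⟩
      · intro p hp
        rcases List.mem_cons.mp hp with h | h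
        · subst h; left; rfl
        · exact h1 p h
      · simp only [adjOK, Bool.and_eq_true]
        exact ⟨by simpa using fun h => hd h.symm, h2⟩

-- processing three equal chars leaves a Good stack unchanged
theorem triple_id (st : List (Char × Nat)) (c : Char) (h : Good st) :
    stepB (stepB (stepB st c) c) c = st := by
  obtain ⟨h1, h2⟩ := h
  rcases st with _ | ⟨⟨d, k⟩, rest⟩
  · simp [stepB]
  · by_cases hd : d = c
    · subst hd
      rcases h1 (d, k) (by simp) with hk | hk <;> subst hk
      · -- count 1: incr to 2, pop, push (d,1)
        rcases rest with _ | ⟨⟨e, j⟩, rest'⟩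
        · simp [stepB]
        · have he : d ≠ e := by
            simp only [adjOK, Bool.and_eq_true] at h2
            simpa using h2.1
          simp [stepB, he.symm]
      · -- count 2: pop, push (d,1), incr to 2
        rcases rest with _ | ⟨⟨e, j⟩, rest'⟩
        · simp [stepB]
        · have he : d ≠ e := by
            simp only [adjOK, Bool.and_eq_true] at h2
            simpa using h2.1
          simp [stepB, he.symm]
    · simp [stepB, hd]

theorem passA_fold (l : List Char) :
    ∀ st, Good st → List.foldl stepB st (passA l) = List.foldl stepB st l := by
  fun_induction passA with
  | case1 c1 c2 c3 rest h ih =>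
      intro st hst
      obtain ⟨h2, h3⟩ := h
      subst h2; subst h3
      rw [ih st hst]
      simp only [List.foldl]
      rw [triple_id st c1 hst]
  | case2 c1 c2 c3 rest h ih =>
      intro st hst
      simp only [List.foldl]
      exact ih (stepB st c1) (good_step st c1 hst)
  | case3 l h => intro st _; rfl

theorem rt_fold (l : List Char) :
    List.foldl stepB [] (rtList l) = List.foldl stepB [] l := by
  fun_induction rtList with
  | case1 l r heq => rw [show r = passA l from rfl]; exact passA_fold l [] Good_nil
  | case2 l r heq ih =>
      rw [show r = passA l from rfl] at ih ⊢
      rw [ih]; exact passA_fold l [] Good_nil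

theorem tf_passA_eq (l : List Char) (h : tf l = true) : passA l = l := by
  fun_induction passA with
  | case1 c1 c2 c3 rest hc ih =>
      obtain ⟨h2, h3⟩ := hc; subst h2; subst h3
      simp [tf] at h
  | case2 c1 c2 c3 rest hc ih =>
      simp only [tf, if_neg hc] at h
      rw [ih h]
  | case3 l h => rfl

theorem passA_len_tf (l : List Char) (h : (passA l).length = l.length) : tf l = true := by
  fun_induction passA with
  | case1 c1 c2 c3 rest hc ih =>
      have := passA_length rest
      simp at h; omega
  | case2 c1 c2 c3 rest hc ih =>
      simp only [List.length_cons, Nat.add_right_cancel_iff] at h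
      simp only [tf, if_neg hc]
      exact ih h
  | case3 l hm =>
      rcases l with _ | ⟨a, _ | ⟨b, _ | ⟨c, r⟩⟩⟩
      · rfl
      · rfl
      · rfl
      · exact absurd rfl (hm a b c r)

theorem tf_rt (l : List Char) : tf (rtList l) = true := by
  fun_induction rtList with
  | case1 l r heq =>
      rw [show r = passA l from rfl] at heq ⊢
      have htf := passA_len_tf l heq
      rw [tf_passA_eq l htf]; exact htf
  | case2 l r heq ih => exact ih

theorem tf_cons (x : Char) (l : List Char) (h : tf (x :: l) = true) : tf l = true := by
  rcases l with _ | ⟨a, _ | ⟨b, r⟩⟩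
  · rfl
  · rfl
  · by_cases hx : x = a ∧ x = b
    · obtain ⟨h1, h2⟩ := hx; subst h1; subst h2
      simp [tf] at h
    · simpa [tf, hx] using h

theorem tf_drop (xs t : List Char) (h : tf (xs ++ t) = true) : tf t = true := by
  induction xs with
  | nil => exact h
  | cons x xs ih => exact ih (tf_cons x _ h)

theorem tf_triple_false (xs ys : List Char) (c : Char) :
    tf (xs ++ c :: c :: c :: ys) ≠ true := by
  intro h
  have := tf_drop xs _ h
  simp [tf] at this

theorem flatten_cons (c : Char) (k : Nat) (st : List (Char × Nat)) :
    flattenStack ((c, k) :: st) = flattenStack st ++ List.replicate k c := by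
  simp [flattenStack]

-- main invariant: folding a list that keeps the flattened result triple-free just appends
theorem fold_flat (l : List Char) :
    ∀ st, Good st → tf (flattenStack st ++ l) = true →
      flattenStack (List.foldl stepB st l) = flattenStack st ++ l := by
  induction l with
  | nil => intro st _ _; simp
  | cons c rest ih =>
      intro st hst htf
      have hGood := good_step st c hst
      have hflat : flattenStack (stepB st c) = flattenStack st ++ [c] := by
        rcases st with _ | ⟨⟨d, k⟩, st'⟩
        · simp [stepB, flattenStack]
        · by_cases hd : d = c
          · subst hd
            rcases hst.1 (d, k) (by simp) with hk | hk <;> simp at hk <;> subst hk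
            · simp [stepB, flatten_cons]
            · -- pop case: would create a triple, contradiction with htf
              exfalso
              have : flattenStack ((d, 2) :: st') ++ d :: rest
                  = flattenStack st' ++ d :: d :: d :: rest := by
                simp [flatten_cons, List.replicate]
              rw [this] at htf
              exact tf_triple_false _ _ _ htf
          · simp [stepB, hd, flatten_cons]
      simp only [List.foldl]
      rw [ih (stepB st c) hGood (by rw [hflat]; simpa using htf)]
      rw [hflat]; simp

theorem main_list (l : List Char) : rtList l = flattenStack (List.foldl stepB [] l) := by
  have h1 := tf_rt l
  have h2 := fold_flat (rtList l) [] Good_nil (by simpa [flattenStack] using h1)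
  rw [rt_fold] at h2
  simpa [flattenStack] using h2.symm

-- ===== VERDICT (by name: the statement is the Claim_ definition above) =====
theorem remove_triplicate_spec : Claim_equal_remove_triplicate := by
  intro s _
  unfold Spec_remove_triplicate remove_triplicate remove_triplicate_alt
  rw [main_list]
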